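-- pv_equiv track=rewrite | github.com/ainaosyusi/ofc-pineapple-ai | scripts/test_foul_impact.py | _eval_3_no_joker
-- ===== SOURCE A (Python) =====
-- from collections import Counter
--
-- def _eval_3_no_joker(cards):
--     ranks_sorted = sorted([r for r, s in cards], reverse=True)
--     rank_counts = Counter(ranks_sorted)
--     count_groups = sorted(rank_counts.items(), key=lambda x: (x[1], x[0]), reverse=True)
--     if count_groups[0][1] == 3:
--         return (3, [count_groups[0][0]])
--     if count_groups[0][1] == 2:
--         pair_rank = count_groups[0][0]
--         kicker = [r for r in ranks_sorted if r != pair_rank][0]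
--         return (1, [pair_rank, kicker])
--     return (0, ranks_sorted)
-- ===== SOURCE B (Python) =====
-- def _eval_3_no_joker(cards):
--     ranks = sorted((r for r, s in cards), reverse=True)
--     # Equal ranks are adjacent after sorting, so scan runs of adjacent equal
--     # ranks; the first longest run is the best (count, rank) group because
--     # runs appear in descending rank order.
--     cur_rank = None
--     cur_len = best_len = best_rank = 0
--     for r in ranks:
--         cur_len = cur_len + 1 if r == cur_rank else 1
--         cur_rank = r
--         if cur_len > best_len:
--             best_len, best_rank = cur_len, r
--     if best_len == 3:
--         return (3, [best_rank])
--     if best_len == 2: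
--         kicker = next(r for r in ranks if r != best_rank)
--         return (1, [best_rank, kicker])
--     return (0, ranks)
-- ===== Notes on version B (the rewrite author's own statement) =====
-- stated objective: alternative
-- what changed: Replaces A's Counter plus a secondary descending sort of (count, rank) groups with a single adjacent-run scan over the sorted ranks: equal ranks are adjacent after sorting and runs appear in descending rank order, so the first longest run is exactly A's best (count, rank) group; no frequency map or second sort is built.
import Mathlib
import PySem

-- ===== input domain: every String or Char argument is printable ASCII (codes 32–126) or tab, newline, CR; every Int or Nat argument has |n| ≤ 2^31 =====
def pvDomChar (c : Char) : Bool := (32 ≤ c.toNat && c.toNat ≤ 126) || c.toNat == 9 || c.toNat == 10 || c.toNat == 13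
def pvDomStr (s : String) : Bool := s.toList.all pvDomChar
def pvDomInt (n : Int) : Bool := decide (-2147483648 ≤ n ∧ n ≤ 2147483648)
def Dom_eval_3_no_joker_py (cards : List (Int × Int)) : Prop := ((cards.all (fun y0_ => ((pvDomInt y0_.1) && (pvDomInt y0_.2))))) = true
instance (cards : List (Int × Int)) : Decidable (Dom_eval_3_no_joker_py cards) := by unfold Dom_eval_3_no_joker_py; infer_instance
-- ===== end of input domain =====

-- B replaces A's Counter + sort-of-(count,rank)-groups by one adjacent-run scan over the
-- sorted ranks (the first longest run is A's best group) (objective: alternative).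


-- ===== PORT A =====
-- classification part of A, taking the already-sorted rank list
def aClassify (ranks_sorted : List Int) : Int × List Int :=
  let rank_counts : PySem.Dict Int Int := PySem.Dict.counter ranks_sorted
  let count_groups :=
    PySem.List.sorted2 rank_counts.items (fun x => x.2) (fun x => x.1) true
  let g0 := count_groups.headD (0, 0)   -- Python raises IndexError on count_groups[0] for empty input; excluded by Pre_
  if g0.2 == 3 then (3, [g0.1])
  else if g0.2 == 2 then
    let pair_rank := g0.1
    let kicker := (ranks_sorted.filter (fun r => r != pair_rank)).headD 0   -- [...][0]: IndexError when empty; excluded by Pre_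
    (1, [pair_rank, kicker])
  else (0, ranks_sorted)

def eval_3_no_joker_py (cards : List (Int × Int)) : Int × List Int :=
  aClassify (PySem.List.sorted (cards.map (fun p => p.1)) (fun x => x) true)

-- ===== PORT B =====
-- B's loop body: extend or start the current run of adjacent equal ranks,
-- and record a strictly longer run as the new best.
-- state = (cur_rank, cur_len, best_len, best_rank)
def bStep (st : Option Int × Int × Int × Int) (r : Int) : Option Int × Int × Int × Int :=
  let cl : Int := if st.1 == some r then st.2.1 + 1 else 1
  if st.2.2.1 < cl then (some r, cl, cl, r) else (some r, cl, st.2.2.1, st.2.2.2)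

-- classification part of B, on the sorted rank list
def bClassify (ranks : List Int) : Int × List Int :=
  let st := ranks.foldl bStep (none, 0, 0, 0)
  let best_len := st.2.2.1
  let best_rank := st.2.2.2
  if best_len == 3 then (3, [best_rank])
  else if best_len == 2 then
    let kicker := (ranks.filter (fun r => r != best_rank)).headD 0   -- next(...): StopIteration when empty; excluded by Pre_
    (1, [best_rank, kicker])
  else (0, ranks)

def eval_3_no_joker_py_alt (cards : List (Int × Int)) : Int × List Int :=
  bClassify (PySem.List.sorted (cards.map (fun p => p.1)) (fun x => x) true)

-- ===== PRECONDITION & SPEC =====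
-- Pre_ excludes exactly the inputs where Python A raises IndexError: the empty hand
-- (count_groups[0]) and a two-card hand of one rank (the kicker lookup [...][0] on an
-- empty list); Python B raises StopIteration on the latter and returns on the former.
def Pre_eval_3_no_joker_py (cards : List (Int × Int)) : Prop :=
  cards ≠ [] ∧ ¬(cards.length = 2 ∧ (cards.headD (0, 0)).1 = (cards.getLastD (0, 0)).1)
instance (cards : List (Int × Int)) : Decidable (Pre_eval_3_no_joker_py cards) := by
  unfold Pre_eval_3_no_joker_py; infer_instance
def pvWitness_eval_3_no_joker_py : (List (Int × Int)) := [(5, 0), (5, 1), (9, 2)]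
def Spec_eval_3_no_joker_py (cards : List (Int × Int)) (out : Int × List Int) : Prop := out = eval_3_no_joker_py_alt cards
instance (cards : List (Int × Int)) (out : Int × List Int) : Decidable (Spec_eval_3_no_joker_py cards out) := by unfold Spec_eval_3_no_joker_py; infer_instance

-- ===== CLAIM (what is proved, stated in full; the proofs are below) =====
def Claim_equal_eval_3_no_joker_py : Prop := ∀ (cards : List (Int × Int)), Dom_eval_3_no_joker_py cards → Pre_eval_3_no_joker_py cards → Spec_eval_3_no_joker_py cards (eval_3_no_joker_py cards)

-- ===== LEMMAS AND PROOFS =====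

def LexLe (p q : Int × Int) : Prop := p.1 < q.1 ∨ (p.1 = q.1 ∧ p.2 ≤ q.2)

def IsBest (ranks : List Int) (c r : Int) : Prop :=
  r ∈ ranks ∧ c = (List.count r ranks : Int) ∧
    ∀ s ∈ ranks, LexLe ((List.count s ranks : Int), s) (c, r)

theorem isBest_unique {ranks : List Int} {c1 r1 c2 r2 : Int}
    (h1 : IsBest ranks c1 r1) (h2 : IsBest ranks c2 r2) : c1 = c2 ∧ r1 = r2 := by
  obtain ⟨m1, e1, u1⟩ := h1
  obtain ⟨m2, e2, u2⟩ := h2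
  have a1 := u1 r2 m2
  have a2 := u2 r1 m1
  rw [← e1] at a2; rw [← e2] at a1
  unfold LexLe at a1 a2
  constructor <;> omega

-- the reverse lex order used by sorted2 on (count, rank) items
def gBefore (a b : Int × Int) : Bool :=
  decide (b.2 < a.2) || (!decide (a.2 < b.2) && decide (b.1 < a.1))

theorem gBefore_trans (a b c : Int × Int) (h1 : gBefore a b = true)
    (h2 : gBefore b c = true) : gBefore a c = true := by
  simp only [gBefore, Bool.or_eq_true, Bool.and_eq_true, Bool.not_eq_eq_eq_not,
    Bool.not_true, decide_eq_true_eq, decide_eq_false_iff_not] at *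
  omega

theorem gBefore_asym (a b : Int × Int) (h : gBefore a b = true) : gBefore b a = false := by
  cases hba : gBefore b a with
  | false => rfl
  | true =>
    exfalso
    simp only [gBefore, Bool.or_eq_true, Bool.and_eq_true, Bool.not_eq_eq_eq_not,
      Bool.not_true, decide_eq_true_eq, decide_eq_false_iff_not] at h hba
    omega

theorem insertBy_pairwise (before : Int × Int → Int × Int → Bool)
    (htrans : ∀ a b c, before a b = true → before b c = true → before a c = true)
    (hasym : ∀ a b, before a b = true → before b a = false)
    (x : Int × Int) (l : List (Int × Int))
    (hl : l.Pairwise (fun a b => before b a = false)) :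
    (PySem.List.insertBy before x l).Pairwise (fun a b => before b a = false) := by
  induction l with
  | nil => simp [PySem.List.insertBy]
  | cons y ys ih =>
    rw [List.pairwise_cons] at hl
    obtain ⟨hy, hys⟩ := hl
    by_cases hxy : before x y = true
    · rw [PySem.List.insertBy, if_pos hxy]
      refine List.Pairwise.cons ?_ (List.Pairwise.cons hy hys)
      intro z hz
      rcases List.mem_cons.1 hz with rfl | hz'
      · exact hasym _ _ hxy
      · by_cases hzx : before z x = true
        · have := htrans z x y hzx hxy
          rw [hy z hz'] at this; exact absurd this (by simp)
        · simpa using hzx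
    · rw [PySem.List.insertBy, if_neg hxy]
      refine List.Pairwise.cons ?_ (ih hys)
      intro z hz
      rcases (PySem.List.mem_insertBy before x z ys).1 hz with rfl | hz'
      · simpa using hxy
      · exact hy z hz'

theorem foldl_insertBy_pairwise (before : Int × Int → Int × Int → Bool)
    (htrans : ∀ a b c, before a b = true → before b c = true → before a c = true)
    (hasym : ∀ a b, before a b = true → before b a = false)
    (l acc : List (Int × Int))
    (hacc : acc.Pairwise (fun a b => before b a = false)) :
    (l.foldl (fun acc x => PySem.List.insertBy before x acc) acc).Pairwise
      (fun a b => before b a = false) := by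
  induction l generalizing acc with
  | nil => simpa using hacc
  | cons x xs ih => exact ih _ (insertBy_pairwise before htrans hasym x acc hacc)

theorem aBest (ranks : List Int) (h : ranks ≠ []) :
    IsBest ranks
      ((PySem.List.sorted2 (PySem.Dict.counter ranks).items
          (fun x => x.2) (fun x => x.1) true).headD (0, 0)).2
      ((PySem.List.sorted2 (PySem.Dict.counter ranks).items
          (fun x => x.2) (fun x => x.1) true).headD (0, 0)).1 := by
  have hperm := PySem.List.sorted2_perm (PySem.Dict.counter ranks).items
      (fun x : Int × Int => x.2) (fun x : Int × Int => x.1) true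
  have hpw : (PySem.List.sorted2 (PySem.Dict.counter ranks).items
      (fun x => x.2) (fun x => x.1) true).Pairwise (fun a b => gBefore b a = false) := by
    have he : PySem.List.sorted2 (PySem.Dict.counter ranks).items
        (fun x => x.2) (fun x => x.1) true
        = (PySem.Dict.counter ranks).items.foldl
            (fun acc x => PySem.List.insertBy gBefore x acc) [] := rfl
    rw [he]
    exact foldl_insertBy_pairwise gBefore gBefore_trans gBefore_asym _ [] (by simp)
  obtain ⟨r0, rest, rfl⟩ := List.exists_cons_of_ne_nil h
  have hitems : (PySem.Dict.counter (r0 :: rest)).items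
      = (PySem.Set.ofList (r0 :: rest)).map
          (fun k => (k, (List.count k (r0 :: rest) : Int))) := PySem.Dict.items_counter _
  have hmemitems : ∀ y, y ∈ (PySem.Dict.counter (r0 :: rest)).items ↔
      ∃ k ∈ (r0 :: rest), y = (k, (List.count k (r0 :: rest) : Int)) := by
    intro y
    rw [hitems, List.mem_map]
    constructor
    · rintro ⟨k, hk, rfl⟩
      exact ⟨k, (PySem.Set.mem_ofList _ _).1 hk, rfl⟩
    · rintro ⟨k, hk, rfl⟩
      exact ⟨k, (PySem.Set.mem_ofList _ _).2 hk, rfl⟩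
  have hne : PySem.List.sorted2 (PySem.Dict.counter (r0 :: rest)).items
      (fun x => x.2) (fun x => x.1) true ≠ [] := by
    intro hnil
    have : (PySem.Dict.counter (r0 :: rest)).items = [] := by
      have := hperm.length_eq
      rw [hnil] at this
      exact List.length_eq_zero_iff.1 this.symm
    have hr0 : (r0, (List.count r0 (r0 :: rest) : Int)) ∈ (PySem.Dict.counter (r0 :: rest)).items :=
      (hmemitems _).2 ⟨r0, by simp, rfl⟩
    rw [this] at hr0; exact absurd hr0 (List.not_mem_nil)
  obtain ⟨m, t, hmt⟩ := List.exists_cons_of_ne_nil hne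
  rw [hmt]
  simp only [List.headD_cons]
  have hmmem : m ∈ (PySem.Dict.counter (r0 :: rest)).items := hperm.subset (hmt ▸ List.mem_cons_self)
  obtain ⟨k, hk, hkm⟩ := (hmemitems m).1 hmmem
  have hmax : ∀ y ∈ (PySem.Dict.counter (r0 :: rest)).items, LexLe (y.2, y.1) (m.2, m.1) := by
    intro y hy
    have hy' : y ∈ m :: t := hmt ▸ hperm.symm.subset hy
    rcases List.mem_cons.1 hy' with rfl | hy''
    · unfold LexLe; omega
    · rw [hmt] at hpw
      have := (List.pairwise_cons.1 hpw).1 y hy''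
      simp only [gBefore, Bool.or_eq_false_iff, Bool.and_eq_false_iff,
        Bool.not_eq_eq_eq_not, Bool.not_false, decide_eq_false_iff_not,
        decide_eq_true_eq] at this
      unfold LexLe
      rcases this with ⟨h1, h2 | h2⟩ <;> omega
  subst hkm
  refine ⟨hk, rfl, ?_⟩
  intro s hs
  have hsy : ((s, (List.count s (r0 :: rest) : Int)) : Int × Int)
      ∈ (PySem.Dict.counter (r0 :: rest)).items := (hmemitems _).2 ⟨s, hs, rfl⟩
  have := hmax _ hsy
  simpa [PySem.List.count] using this

-- invariant of B's run-scan fold after processing the (sorted-descending) prefix pre: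
-- cur_rank is pre's last element m (which is minimal in pre), cur_len is m's count,
-- and (best_len, best_rank) is the lex-greatest (count, rank) pair of pre.
def RunInv (pre : List Int) (st : Option Int × Int × Int × Int) : Prop :=
  ∃ m, pre.getLast? = some m ∧ (∀ x ∈ pre, m ≤ x) ∧
    st.1 = some m ∧ st.2.1 = (List.count m pre : Int) ∧
    st.2.2.2 ∈ pre ∧ st.2.2.1 = (List.count st.2.2.2 pre : Int) ∧
    ∀ s ∈ pre, LexLe ((List.count s pre : Int), s) (st.2.2.1, st.2.2.2)

theorem runInv_step (pre : List Int) (r : Int) (st : Option Int × Int × Int × Int)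
    (h : RunInv pre st) (hle : ∀ x ∈ pre, r ≤ x) : RunInv (pre ++ [r]) (bStep st r) := by
  obtain ⟨m, hlast, hmin, hcur, hclen, hbmem, hblen, hbmax⟩ := h
  have hmmem : m ∈ pre := List.mem_of_getLast? (by exact hlast)
  have hrm : r ≤ m := hle m hmmem
  have hcnt : ∀ s : Int, (List.count s (pre ++ [r]) : Int)
      = (List.count s pre : Int) + (if s = r then 1 else 0) := by
    intro s
    rw [List.count_append]
    by_cases hs : s = r
    · subst hs; simp
    · simp [hs, Ne.symm hs]
  have hbpos : (1 : Int) ≤ (List.count st.2.2.2 pre : Int) := by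
    have := List.count_pos_iff.2 hbmem
    omega
  have hlastnew : (pre ++ [r]).getLast? = some r := by simp
  have hminnew : ∀ x ∈ pre ++ [r], r ≤ x := by
    intro x hx
    rcases List.mem_append.1 hx with hx | hx
    · exact hle x hx
    · simp at hx; omega
  by_cases hr : r = m
  · -- extending the current run
    subst hr
    have hcond : (st.1 == some r) = true := by rw [hcur]; simp
    simp only [bStep, hcond, if_true]
    have hnew : (List.count r (pre ++ [r]) : Int) = (List.count r pre : Int) + 1 := by
      rw [hcnt]; simp
    split_ifs with hlt
    · -- new longest run: (count r + 1, r) is the new best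
      refine ⟨r, hlastnew, hminnew, rfl, by rw [hnew, hclen], by simp, by rw [hnew, hclen], ?_⟩
      intro s hs
      rcases List.mem_append.1 hs with hs | hs
      · have hmax := hbmax s hs
        have hc := hcnt s
        unfold LexLe at *
        simp only at *
        rw [hclen] at hlt
        by_cases hsr : s = r
        · subst hsr; rw [if_pos rfl] at hc; omega
        · rw [if_neg hsr] at hc; omega
      · simp at hs; subst hs
        have hc := hcnt s
        rw [if_pos rfl] at hc
        unfold LexLe
        simp only at *
        rw [hclen] at hlt
        omega
    · -- best unchanged; the extended run still does not beat it
      have hbner : st.2.2.2 ≠ r := by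
        intro he
        rw [he, ← hclen] at hblen
        omega
      refine ⟨r, hlastnew, hminnew, rfl, by rw [hnew, hclen],
        List.mem_append_left _ hbmem, by show st.2.2.1 = (List.count st.2.2.2 (pre ++ [r]) : Int); rw [hcnt, if_neg hbner, hblen]; omega, ?_⟩
      intro s hs
      have hrb : r ≤ st.2.2.2 := hle _ hbmem
      rw [hclen] at hlt
      rcases List.mem_append.1 hs with hs | hs
      · have hmax := hbmax s hs
        have hc := hcnt s
        unfold LexLe at *
        simp only at *
        by_cases hsr : s = r
        · subst hsr; rw [if_pos rfl] at hc; omega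
        · rw [if_neg hsr] at hc; omega
      · simp at hs; subst hs
        have hc := hcnt s
        rw [if_pos rfl] at hc
        unfold LexLe
        simp only at *
        omega
  · -- r starts a new run of length 1
    have hcond : (st.1 == some r) = false := by
      rw [hcur]
      simp only [beq_eq_false_iff_ne, ne_eq, Option.some.injEq]
      omega
    have hrnotmem : r ∉ pre := by
      intro hxr
      have := hmin r hxr
      omega
    have hcr0 : List.count r pre = 0 := List.count_eq_zero.2 hrnotmem
    have hnew : (List.count r (pre ++ [r]) : Int) = 1 := by
      rw [hcnt, if_pos rfl, hcr0]; simp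
    simp [bStep, hcond]
    split_ifs with hlt
    · -- best_len < 1 is impossible for nonempty pre
      exfalso
      simp only at hlt
      omega
    · have hbner : st.2.2.2 ≠ r := fun he => hrnotmem (he ▸ hbmem)
      refine ⟨r, hlastnew, hminnew, rfl, hnew.symm,
        List.mem_append_left _ hbmem, by show st.2.2.1 = (List.count st.2.2.2 (pre ++ [r]) : Int); rw [hcnt, if_neg hbner, hblen]; omega, ?_⟩
      intro s hs
      simp only at hlt
      rcases List.mem_append.1 hs with hs | hs
      · have hmax := hbmax s hs
        have hc := hcnt s
        have hsner : s ≠ r := fun he => hrnotmem (he ▸ hs)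
        rw [if_neg hsner] at hc
        unfold LexLe at *
        simp only at *
        omega
      · simp at hs; subst hs
        have hrb : s < st.2.2.2 := by
          have := hmin _ hbmem
          omega
        have hc := hcnt s
        rw [if_pos rfl, hcr0] at hc
        unfold LexLe
        simp only at *
        omega

theorem fold_runInv (l pre : List Int) (st : Option Int × Int × Int × Int)
    (hsorted : (pre ++ l).Pairwise (fun a b => b ≤ a)) (h : RunInv pre st) :
    RunInv (pre ++ l) (l.foldl bStep st) := by
  induction l generalizing pre st with
  | nil => simpa using h
  | cons r rest ih =>
    have hle : ∀ x ∈ pre, r ≤ x := by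
      intro x hx
      exact (List.pairwise_append.1 hsorted).2.2 x hx r (by simp)
    have hstep := runInv_step pre r st h hle
    have hassoc : pre ++ r :: rest = (pre ++ [r]) ++ rest := by simp
    rw [hassoc] at hsorted ⊢
    exact ih (pre ++ [r]) (bStep st r) hsorted hstep

theorem bBest (ranks : List Int) (h : ranks ≠ [])
    (hsorted : ranks.Pairwise (fun a b => b ≤ a)) :
    IsBest ranks (ranks.foldl bStep (none, 0, 0, 0)).2.2.1
      (ranks.foldl bStep (none, 0, 0, 0)).2.2.2 := by
  obtain ⟨r0, rest, rfl⟩ := List.exists_cons_of_ne_nil h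
  have hinit : RunInv [r0] (bStep (none, 0, 0, 0) r0) := by
    refine ⟨r0, by simp, by simp, ?_⟩
    simp [bStep, List.count_singleton, LexLe]
  have hpre : ([r0] : List Int) ++ rest = r0 :: rest := by simp
  have hinv := fold_runInv rest [r0] (bStep (none, 0, 0, 0) r0) (by rw [hpre]; exact hsorted) hinit
  rw [hpre] at hinv
  obtain ⟨m, _, _, _, _, hbmem, hblen, hbmax⟩ := hinv
  exact ⟨hbmem, hblen, hbmax⟩

theorem classify_eq (ranks : List Int) (h : ranks ≠ [])
    (hsorted : ranks.Pairwise (fun a b => b ≤ a)) :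
    aClassify ranks = bClassify ranks := by
  have hA : IsBest ranks
      ((PySem.List.sorted2 (PySem.Dict.counter ranks).items
          (fun x => x.2) (fun x => x.1) true).headD (0, 0)).2
      ((PySem.List.sorted2 (PySem.Dict.counter ranks).items
          (fun x => x.2) (fun x => x.1) true).headD (0, 0)).1 := aBest ranks h
  have hB := bBest ranks h hsorted
  obtain ⟨hc, hr⟩ := isBest_unique hA hB
  simp only [aClassify, bClassify]
  rw [hc, hr]

-- ===== VERDICT =====
theorem eval_3_no_joker_py_spec : Claim_equal_eval_3_no_joker_py := by
  intro cards _ hpre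
  unfold Spec_eval_3_no_joker_py eval_3_no_joker_py eval_3_no_joker_py_alt
  apply classify_eq
  · rw [Ne, PySem.List.sorted_eq_nil_iff, List.map_eq_nil_iff]
    exact hpre.1
  · simpa using PySem.List.sorted_pairwise_rev (cards.map (fun p => p.1)) (fun x => x)
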